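-- pv_equiv track=rewrite | github.com/Papr-ai/memory-opensource | core/document_processing/parse_integration.py | _extract_document_title
-- ===== SOURCE A (Python) =====
-- from typing import Dict, Any, Optional, List
--
-- def _extract_document_title(pages: List[Dict[str, Any]]) -> str:
--     """Extract a meaningful title from the first page content"""
--
--     if not pages:
--         return "Document Upload"
--
--     first_page = pages[0]
--     content = first_page.get("content", "")
--
--     if not content:
--         return "Document Upload"
--
--     # Split into lines and look for a good title
--     lines = content.split('\n')
--
--     for line in lines:
--         line = line.strip()
--         if len(line) > 10 and len(line) < 100:
--             # Check if it looks like a title (not too long, has meaningful words)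
--             words = line.split()
--             if len(words) >= 2 and len(words) <= 12:
--                 return line
--
--     # Fallback to first non-empty line
--     for line in lines:
--         line = line.strip()
--         if line and len(line) > 5:
--             return line[:80] + ("..." if len(line) > 80 else "")
--
--     return "Document Upload"
-- ===== SOURCE B (Python) =====
-- def _extract_document_title(pages):
--     """One pass over the stripped lines: return the first good title immediately,
--     recording the first long-enough line as fallback along the way."""
--     if not pages:
--         return "Document Upload"
--     content = pages[0].get("content", "")
--     if not content:
--         return "Document Upload"
--     fallback = None
--     for raw in content.split('\n'):
--         line = raw.strip()
--         if 10 < len(line) < 100 and 2 <= len(line.split()) <= 12: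
--             return line
--         if fallback is None and len(line) > 5:
--             fallback = line[:80] + ("..." if len(line) > 80 else "")
--     return fallback if fallback is not None else "Document Upload"
-- ===== Notes on version B (the rewrite author's own statement) =====
-- stated objective: simpler
-- what changed: Replaced A's two sequential scans over the split lines with a single pass that returns the first good title immediately and records the first fallback line along the way.
import Mathlib
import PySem

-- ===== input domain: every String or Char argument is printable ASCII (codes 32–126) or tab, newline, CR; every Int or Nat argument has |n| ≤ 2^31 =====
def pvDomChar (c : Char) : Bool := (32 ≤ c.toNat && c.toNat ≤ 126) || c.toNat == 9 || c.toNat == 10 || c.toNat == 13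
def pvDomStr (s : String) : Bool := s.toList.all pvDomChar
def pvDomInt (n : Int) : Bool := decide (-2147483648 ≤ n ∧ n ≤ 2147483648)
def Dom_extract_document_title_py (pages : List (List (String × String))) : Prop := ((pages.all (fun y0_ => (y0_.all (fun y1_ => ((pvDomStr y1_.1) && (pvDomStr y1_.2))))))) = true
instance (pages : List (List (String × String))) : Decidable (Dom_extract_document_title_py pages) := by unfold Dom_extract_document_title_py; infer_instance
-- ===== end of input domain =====

-- B makes one pass over the stripped lines (returning the first good title, recording
-- the first fallback line while scanning) instead of A's two sequential scans: simpler.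

-- ===== PORT A =====
-- first for-loop of A: first line that looks like a title
def pvScan1A : List (List Char) → Option (List Char)
  | [] => none
  | l :: rest =>
    let line := PySem.Chars.strip l
    if 10 < line.length ∧ line.length < 100 then
      let words := PySem.Chars.split₀ line
      if 2 ≤ words.length ∧ words.length ≤ 12 then some line else pvScan1A rest
    else pvScan1A rest

-- second for-loop of A: first non-empty line with len > 5, truncated to 80
def pvScan2A : List (List Char) → Option (List Char)
  | [] => none
  | l :: rest =>
    let line := PySem.Chars.strip l
    if line ≠ [] ∧ 5 < line.length then
      some (line.take 80 ++ (if 80 < line.length then "...".toList else []))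
    else pvScan2A rest

def extract_document_title_py (pages : List (List (String × String))) : String :=
  match pages with
  | [] => "Document Upload"
  | first_page :: _ =>
    let content := ((first_page.find? (fun kv => kv.1 == "content")).map (·.2)).getD ""
    if content.toList = [] then "Document Upload"
    else
      let lines := PySem.Chars.splitOn content.toList "\n".toList
      match pvScan1A lines with
      | some t => String.ofList t
      | none =>
        match pvScan2A lines with
        | some t => String.ofList t
        | none => "Document Upload"

-- ===== PORT B =====
def pvIsGoodTitle (line : List Char) : Bool :=
  decide (10 < line.length ∧ line.length < 100
          ∧ 2 ≤ (PySem.Chars.split₀ line).length ∧ (PySem.Chars.split₀ line).length ≤ 12)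

-- B's single loop, carrying the optional fallback
def pvOnePassB : List (List Char) → Option (List Char) → List Char
  | [], fb => fb.getD "Document Upload".toList
  | l :: rest, fb =>
    let line := PySem.Chars.strip l
    if pvIsGoodTitle line then line
    else if fb = none ∧ 5 < line.length then
      pvOnePassB rest (some (line.take 80 ++ (if 80 < line.length then "...".toList else [])))
    else pvOnePassB rest fb

def extract_document_title_py_alt (pages : List (List (String × String))) : String :=
  match pages with
  | [] => "Document Upload"
  | first_page :: _ =>
    let content := ((first_page.find? (fun kv => kv.1 == "content")).map (·.2)).getD ""
    if content.toList = [] then "Document Upload"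
    else String.ofList (pvOnePassB (PySem.Chars.splitOn content.toList "\n".toList) none)

-- ===== PRECONDITION & SPEC =====
def Spec_extract_document_title_py (pages : List (List (String × String))) (out : String) : Prop := out = extract_document_title_py_alt pages
instance (pages : List (List (String × String))) (out : String) : Decidable (Spec_extract_document_title_py pages out) := by unfold Spec_extract_document_title_py; infer_instance

-- ===== CLAIM (what is proved, stated in full; the proofs are below) =====
def Claim_equal_extract_document_title_py : Prop := ∀ (pages : List (List (String × String))), Dom_extract_document_title_py pages → Spec_extract_document_title_py pages (extract_document_title_py pages)

-- ===== LEMMAS AND PROOFS =====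

-- B's single pass computes: first good title if any, else the carried fallback, else
-- the first fallback found by a second scan, else the default.
theorem pvOnePassB_eq (lines : List (List Char)) (fb : Option (List Char)) :
    pvOnePassB lines fb =
      match pvScan1A lines with
      | some t => t
      | none =>
        match fb with
        | some f => f
        | none => (pvScan2A lines).getD "Document Upload".toList := by
  induction lines generalizing fb with
  | nil => cases fb <;> simp [pvOnePassB, pvScan1A, pvScan2A, Option.getD]
  | cons l rest ih =>
    simp only [pvOnePassB, pvScan1A, pvScan2A]
    set line := PySem.Chars.strip l with hline
    by_cases hg : 10 < line.length ∧ line.length < 100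
        ∧ 2 ≤ (PySem.Chars.split₀ line).length ∧ (PySem.Chars.split₀ line).length ≤ 12
    · have hb : pvIsGoodTitle line = true := by
        simp only [pvIsGoodTitle, decide_eq_true_eq]; exact hg
      rw [hb, if_pos rfl,
          if_pos (And.intro hg.1 hg.2.1), if_pos (And.intro hg.2.2.1 hg.2.2.2)]
    · have hb : pvIsGoodTitle line = false := by
        simp only [pvIsGoodTitle, decide_eq_false_iff_not]; exact hg
      rw [hb]
      simp only [Bool.false_eq_true, if_false]
      -- A's scan1 also skips this line
      have hs1 : (if 10 < line.length ∧ line.length < 100 then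
          if 2 ≤ (PySem.Chars.split₀ line).length ∧ (PySem.Chars.split₀ line).length ≤ 12
          then some line else pvScan1A rest
          else pvScan1A rest) = pvScan1A rest := by
        split_ifs with h1 h2
        · exact absurd ⟨h1.1, h1.2, h2.1, h2.2⟩ hg
        · rfl
        · rfl
      rw [hs1]
      cases fb with
      | some f =>
        rw [if_neg (show ¬ ((some f : Option (List Char)) = none ∧ 5 < line.length) by simp),
            ih]
      | none =>
        by_cases h5 : 5 < line.length
        · have hne : line ≠ [] := by
            intro h; rw [h] at h5; simp at h5
          rw [if_pos (show (none : Option (List Char)) = none ∧ 5 < line.length from ⟨rfl, h5⟩),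
              ih,
              if_pos (show line ≠ [] ∧ 5 < line.length from ⟨hne, h5⟩)]
          cases pvScan1A rest <;> simp [Option.getD]
        · rw [if_neg (show ¬ ((none : Option (List Char)) = none ∧ 5 < line.length) from
                fun h => h5 h.2),
              ih,
              if_neg (show ¬ (line ≠ [] ∧ 5 < line.length) from fun h => h5 h.2)]

-- ===== VERDICT (by name: the statement is the Claim_ definition above) =====
theorem extract_document_title_py_spec : Claim_equal_extract_document_title_py := by
  unfold Claim_equal_extract_document_title_py
  intro pages _
  unfold Spec_extract_document_title_py extract_document_title_py extract_document_title_py_alt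
  cases pages with
  | nil => rfl
  | cons fp rest =>
    simp only
    set content := ((fp.find? (fun kv => kv.1 == "content")).map (·.2)).getD "" with hc
    by_cases hempty : content.toList = []
    · rw [if_pos hempty, if_pos hempty]
    · rw [if_neg hempty, if_neg hempty]
      rw [pvOnePassB_eq]
      cases h1 : pvScan1A (PySem.Chars.splitOn content.toList "\n".toList) with
      | some t => simp
      | none =>
        simp only
        cases h2 : pvScan2A (PySem.Chars.splitOn content.toList "\n".toList) with
        | some t => simp [Option.getD]
        | none => simp [Option.getD]
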